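-- pv_equiv track=rewrite | github.com/Lvshu6/MyDiffSynth-Studio | diffsynth/utils/yxd/split_video2_1.py | dynamic_split_lengths
-- ===== SOURCE A (Python) =====
-- def dynamic_split_lengths(total_frames, lengths=[33, 29, 25, 21, 17, 13, 9, 5]):
--     """
--     根据剩余帧数，依次尝试使用最大可行的片段长度。
--     例如：55 → [33, 21, 5]
--     """
--     result = []
--     remain = total_frames
--
--     while remain > 0:
--         for L in lengths:
--             if remain >= L:
--                 result.append(L)
--                 remain -= L
--                 break
--         else:
--             # remain < 最小长度 → 用最小长度补齐
--             result.append(lengths[-1])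
--             remain = 0
--
--     return result
-- ===== SOURCE B (Python) =====
-- def dynamic_split_lengths(total_frames, lengths=[33, 29, 25, 21, 17, 13, 9, 5]):
--     """
--     One pass over `lengths`: each length that fits is emitted in a whole
--     arithmetic chunk (divmod) instead of one subtraction per segment.
--     """
--     remain = total_frames
--     result = []
--     for L in lengths:
--         if remain <= 0:
--             break
--         if remain >= L:
--             q, remain = divmod(remain, L)
--             result += [L] * q
--     if remain > 0:
--         result.append(lengths[-1])
--     return result
-- ===== Notes on version B (the rewrite author's own statement) =====
-- stated objective: alternative
-- what changed: Replaces A's restart-the-scan-per-segment loop (one subtraction per emitted segment) with a single pass over `lengths` that emits each fitting length as a whole chunk via divmod (quotient copies at once, remainder carried on); intended as an asymptotic improvement but not confirmed.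
-- outside the precondition, e.g. on dynamic_split_lengths(6, [3, 0]): A returns [3, 3], B returns [3, 3]; on dynamic_split_lengths(4, [10, -1, 25]): A returns [-1, -1, -1, -1, -1, -1, 10], B returns []; on dynamic_split_lengths(7, [3, 0]): A does not finish within the time limit, B raises ZeroDivisionError
import Mathlib
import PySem

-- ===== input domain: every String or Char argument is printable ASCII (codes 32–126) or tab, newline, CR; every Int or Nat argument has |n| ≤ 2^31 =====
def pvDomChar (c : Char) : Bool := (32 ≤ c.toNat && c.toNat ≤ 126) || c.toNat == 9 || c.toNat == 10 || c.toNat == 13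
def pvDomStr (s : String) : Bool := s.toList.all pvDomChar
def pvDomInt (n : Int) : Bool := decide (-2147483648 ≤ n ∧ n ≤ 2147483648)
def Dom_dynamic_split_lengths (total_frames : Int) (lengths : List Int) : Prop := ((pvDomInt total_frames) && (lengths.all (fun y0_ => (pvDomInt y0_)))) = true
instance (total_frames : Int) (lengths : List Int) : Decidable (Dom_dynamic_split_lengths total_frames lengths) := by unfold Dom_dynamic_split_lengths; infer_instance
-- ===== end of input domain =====

-- B replaces A's restart-the-scan-per-segment subtraction loop with one pass over
-- `lengths` emitting each fitting length as a whole divmod chunk (objective: alternative).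

-- ===== PORT A =====

-- `for L in lengths: if remain >= L: … break  else: …` — the first L with remain ≥ L
def pvFirstFit (remain : Int) : List Int → Option Int
  | [] => none
  | L :: rest => if remain ≥ L then some L else pvFirstFit remain rest

-- A's `while remain > 0` loop; fuel makes the (possibly non-terminating) loop total.
-- When pvFirstFit is none, A appends lengths[-1] (IndexError on [] → excluded by Pre_;
-- the .getD 0 only fills that excluded case).
def dslA_loop (lengths : List Int) : Nat → Int → List Int
  | 0, _ => []
  | fuel + 1, remain =>
    if remain > 0 then
      match pvFirstFit remain lengths with
      | some L => L :: dslA_loop lengths fuel (remain - L)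
      | none => [(PySem.List.pyGet? lengths (-1)).getD 0]
    else []

def dynamic_split_lengths (total_frames : Int) (lengths : List Int) : List Int :=
  dslA_loop lengths (total_frames.toNat + 1) total_frames

-- ===== PORT B =====

-- B's single `for L in lengths` pass, threading `remain`; returns (final remain, chunks).
-- `[L] * q` with q < 0 is [] in Python, matched by `.toNat` clamping.
def dslB_loop (remain : Int) : List Int → Int × List Int
  | [] => (remain, [])
  | L :: rest =>
    if remain ≤ 0 then (remain, [])
    else if remain ≥ L then
      let q := PySem.Int.floordiv remain L
      let r := PySem.Int.mod remain L
      let p := dslB_loop r rest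
      (p.1, List.replicate q.toNat L ++ p.2)
    else dslB_loop remain rest

def dynamic_split_lengths_alt (total_frames : Int) (lengths : List Int) : List Int :=
  let p := dslB_loop total_frames lengths
  if p.1 > 0 then p.2 ++ [(PySem.List.pyGet? lengths (-1)).getD 0] else p.2

-- ===== PRECONDITION & SPEC =====
-- Pre_ excludes (a) positive total with empty `lengths` (A raises IndexError) and
-- (b) `lengths` containing a non-positive entry when total is positive: there A loops
-- forever on most such inputs (e.g. (7,[3,0])), and whether it happens to terminate
-- (e.g. (6,[3,0]), where both programs return [3,3]) depends on the run, not on a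
-- closed-form shape of the input, so these are excluded wholesale.
def Pre_dynamic_split_lengths (total_frames : Int) (lengths : List Int) : Prop :=
  total_frames ≤ 0 ∨ (lengths ≠ [] ∧ ∀ L ∈ lengths, 0 < L)
instance (total_frames : Int) (lengths : List Int) : Decidable (Pre_dynamic_split_lengths total_frames lengths) := by unfold Pre_dynamic_split_lengths; infer_instance

def pvWitness_dynamic_split_lengths : Int × List Int := (55, [33, 29, 25, 21, 17, 13, 9, 5])

def Spec_dynamic_split_lengths (total_frames : Int) (lengths : List Int) (out : List Int) : Prop := out = dynamic_split_lengths_alt total_frames lengths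
instance (total_frames : Int) (lengths : List Int) (out : List Int) : Decidable (Spec_dynamic_split_lengths total_frames lengths out) := by unfold Spec_dynamic_split_lengths; infer_instance

-- ===== CLAIM (what is proved, stated in full; the proofs are below) =====
def Claim_equal_dynamic_split_lengths : Prop := ∀ (total_frames : Int) (lengths : List Int), Dom_dynamic_split_lengths total_frames lengths → Pre_dynamic_split_lengths total_frames lengths → Spec_dynamic_split_lengths total_frames lengths (dynamic_split_lengths total_frames lengths)

-- ===== LEMMAS AND PROOFS =====

theorem dslA_step (lengths : List Int) (f : Nat) (remain : Int) :
    dslA_loop lengths (f + 1) remain =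
      (if remain > 0 then
        match pvFirstFit remain lengths with
        | some L => L :: dslA_loop lengths f (remain - L)
        | none => [(PySem.List.pyGet? lengths (-1)).getD 0]
      else []) := rfl

theorem pvFirstFit_mem {r L : Int} : ∀ {ls : List Int}, pvFirstFit r ls = some L → L ∈ ls := by
  intro ls
  induction ls with
  | nil => simp [pvFirstFit]
  | cons x xs ih =>
    intro h
    simp only [pvFirstFit] at h
    split at h
    · simp_all
    · exact List.mem_cons_of_mem _ (ih h)

theorem pvFirstFit_append {r : Int} {pre : List Int} (suff : List Int)
    (h : ∀ p ∈ pre, r < p) : pvFirstFit r (pre ++ suff) = pvFirstFit r suff := by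
  induction pre with
  | nil => rfl
  | cons x xs ih =>
    have hx : r < x := h x (by simp)
    simp only [List.cons_append, pvFirstFit, if_neg (by omega : ¬ r ≥ x)]
    exact ih (fun p hp => h p (List.mem_cons_of_mem _ hp))

theorem pvFirstFit_antitone {L r r' : Int} : ∀ {ls : List Int},
    pvFirstFit r ls = some L → L ≤ r' → r' ≤ r → pvFirstFit r' ls = some L := by
  intro ls
  induction ls with
  | nil => simp [pvFirstFit]
  | cons x xs ih =>
    intro h hL hr
    simp only [pvFirstFit] at h ⊢
    split at h
    · have : L = x := by simp_all
      subst this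
      rw [if_pos (by omega)]
    · rename_i hx
      rw [if_neg (by omega)]
      exact ih h hL hr

theorem dslA_fuel_irrel {lengths : List Int} (hpos : ∀ L ∈ lengths, 0 < L) :
    ∀ (f1 : Nat) {f2 : Nat} {remain : Int}, remain.toNat < f1 → remain.toNat < f2 →
    dslA_loop lengths f1 remain = dslA_loop lengths f2 remain := by
  intro f1
  induction f1 with
  | zero => omega
  | succ f ih =>
    intro f2 remain h1 h2
    obtain ⟨g, rfl⟩ : ∃ g, f2 = g + 1 := ⟨f2 - 1, by omega⟩
    simp only [dslA_loop]
    split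
    · rename_i hr
      cases hf : pvFirstFit remain lengths with
      | none => rfl
      | some L =>
        have hL : 0 < L := hpos L (pvFirstFit_mem hf)
        have := ih (f2 := g) (remain := remain - L) (by omega) (by omega)
        simp only [this]
    · rfl

-- A emits the whole chunk of a fitting first length L (one L per iteration),
-- landing exactly on remain % L.
theorem dslA_chunk {lengths : List Int} (hpos : ∀ L ∈ lengths, 0 < L) {L : Int}
    (hL : 0 < L) :
    ∀ (n : Nat) (remain : Int) (fuel : Nat), remain.toNat ≤ n → remain.toNat < fuel →
    L ≤ remain → pvFirstFit remain lengths = some L →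
    dslA_loop lengths fuel remain =
      List.replicate (PySem.Int.floordiv remain L).toNat L
        ++ dslA_loop lengths fuel (PySem.Int.mod remain L) := by
  intro n
  induction n with
  | zero => intro remain fuel h1 _ h3 _; omega
  | succ n ih =>
    intro remain fuel h1 hfuel h3 hfit
    obtain ⟨f, rfl⟩ : ∃ f, fuel = f + 1 := ⟨fuel - 1, by omega⟩
    have hdiv : PySem.Int.floordiv remain L = remain / L :=
      PySem.Int.floordiv_eq_ediv_of_pos hL
    have hmod : PySem.Int.mod remain L = remain % L :=
      PySem.Int.mod_eq_emod_of_pos hL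
    have hmod_lt : remain % L < L := Int.emod_lt_of_pos _ hL
    have hmod_nonneg : 0 ≤ remain % L := Int.emod_nonneg _ (by omega)
    rw [dslA_step, if_pos (show remain > 0 by omega)]
    simp only [hfit]
    by_cases hcase : L ≤ remain - L
    · -- more than one copy: recurse on remain - L
      have hfit' : pvFirstFit (remain - L) lengths = some L :=
        pvFirstFit_antitone hfit hcase (by omega)
      have hrec := ih (remain - L) f (by omega) (by omega) hcase hfit'
      rw [hrec]
      have hdiv' : PySem.Int.floordiv (remain - L) L = remain / L - 1 := by
        rw [PySem.Int.floordiv_eq_ediv_of_pos hL]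
        have h : remain - L = remain + (-1) * L := by ring
        rw [h, Int.add_mul_ediv_right _ _ (by omega : L ≠ 0)]
        omega
      have hmod' : PySem.Int.mod (remain - L) L = remain % L := by
        rw [PySem.Int.mod_eq_emod_of_pos hL]
        have h : remain - L = remain + L * (-1) := by ring
        rw [h, Int.add_mul_emod_self_left]
      rw [hdiv', hmod', hdiv, hmod]
      have hq1 : 1 ≤ remain / L := by
        rw [Int.le_ediv_iff_mul_le hL]; omega
      have htn : (remain / L).toNat = (remain / L - 1).toNat + 1 := by omega
      rw [htn]
      have hfi : dslA_loop lengths f (remain % L) = dslA_loop lengths (f + 1) (remain % L) := by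
        apply dslA_fuel_irrel hpos <;> omega
      rw [hfi]
      simp [List.replicate_succ]
    · -- last copy: remain - L < L, so remain / L = 1 and remain % L = remain - L
      have hq1 : 1 ≤ remain / L := by
        rw [Int.le_ediv_iff_mul_le hL]; omega
      have hq2 : remain / L < 2 := by
        by_contra h
        have := (Int.le_ediv_iff_mul_le hL).mp (by omega : (2 : Int) ≤ remain / L)
        omega
      have hdiv1 : remain / L = 1 := by omega
      have hmodv : remain % L = remain - L := by
        have h := Int.mul_ediv_add_emod remain L
        rw [hdiv1] at h
        omega
      rw [hdiv, hmod, hdiv1, hmodv]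
      have hfi : dslA_loop lengths f (remain - L) = dslA_loop lengths (f + 1) (remain - L) := by
        apply dslA_fuel_irrel hpos <;> omega
      rw [hfi]
      simp [List.replicate_succ]

theorem dslB_nonpos {remain : Int} (h : remain ≤ 0) :
    ∀ (ls : List Int), dslB_loop remain ls = (remain, []) := by
  intro ls
  cases ls with
  | nil => rfl
  | cons x xs => simp [dslB_loop, h]

-- Main simulation: with `pre` the already-skipped prefix (all > remain), A's loop on
-- the full list equals B's loop on the suffix plus the final lengths[-1] patch.
theorem key_sim {pre0 : List Int} :
    ∀ (suff : List Int) (pre : List Int) (remain : Int) (fuel : Nat),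
    (∀ L ∈ pre ++ suff, 0 < L) → pre0 = pre ++ suff → pre0 ≠ [] →
    (∀ p ∈ pre, remain < p) → remain.toNat < fuel →
    dslA_loop (pre ++ suff) fuel remain =
      (if (dslB_loop remain suff).1 > 0
        then (dslB_loop remain suff).2 ++ [(PySem.List.pyGet? (pre ++ suff) (-1)).getD 0]
        else (dslB_loop remain suff).2) := by
  intro suff
  induction suff with
  | nil =>
    intro pre remain fuel hpos heq hne hskip hfuel
    simp only [dslB_loop]
    obtain ⟨f, rfl⟩ : ∃ f, fuel = f + 1 := ⟨fuel - 1, by omega⟩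
    by_cases hr : remain > 0
    · simp only [dslA_loop, pvFirstFit_append [] hskip, pvFirstFit, if_pos hr]
      rfl
    · simp only [dslA_loop, if_neg hr]
  | cons L rest ih =>
    intro pre remain fuel hpos heq hne hskip hfuel
    by_cases hr : remain > 0
    · by_cases hfit : remain ≥ L
      · -- chunk: A emits (remain // L) copies of L, then both continue at remain % L
        have hL : 0 < L := hpos L (by simp)
        have hfirst : pvFirstFit remain (pre ++ L :: rest) = some L := by
          rw [pvFirstFit_append _ hskip]; simp [pvFirstFit, hfit]
        have hchunk := dslA_chunk hpos hL remain.toNat remain fuel le_rfl hfuel hfit hfirst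
        rw [hchunk]
        have hmod_lt : PySem.Int.mod remain L < L := PySem.Int.mod_lt remain hL
        have hmod_nonneg : 0 ≤ PySem.Int.mod remain L := PySem.Int.mod_nonneg remain hL
        have hassoc : pre ++ L :: rest = (pre ++ [L]) ++ rest := by simp
        have hrec := ih (pre ++ [L]) (PySem.Int.mod remain L) fuel
          (by rw [← hassoc]; exact hpos) (by rw [heq, hassoc]) hne
          (by intro p hp
              rcases List.mem_append.mp hp with h | h
              · exact lt_of_lt_of_le (by omega) (le_of_lt (hskip p h))
              · simp at h; omega)
          (by omega)
        rw [hassoc, hrec, ← hassoc]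
        simp only [dslB_loop, if_neg (by omega : ¬ remain ≤ 0), if_pos hfit]
        split <;> simp
      · -- skip L: first fit is in rest for this and every smaller remain
        have hrec := ih (pre ++ [L]) remain fuel
          (by simpa using hpos) (by simpa using heq) hne
          (by intro p hp
              rcases List.mem_append.mp hp with h | h
              · exact hskip p h
              · simp at h; omega)
          hfuel
        have hassoc : pre ++ L :: rest = (pre ++ [L]) ++ rest := by simp
        rw [hassoc, hrec, ← hassoc]
        simp only [dslB_loop, if_neg (by omega : ¬ remain ≤ 0), if_neg hfit]
    · obtain ⟨f, rfl⟩ : ∃ f, fuel = f + 1 := ⟨fuel - 1, by omega⟩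
      rw [dslA_step, if_neg hr]
      simp only [dslB_loop, if_pos (by omega : remain ≤ 0), if_neg hr]

-- ===== VERDICT (by name: the statement is the Claim_ definition above) =====
theorem dynamic_split_lengths_spec : Claim_equal_dynamic_split_lengths := by
  intro total_frames lengths _ hpre
  unfold Spec_dynamic_split_lengths dynamic_split_lengths dynamic_split_lengths_alt
  by_cases hr : total_frames ≤ 0
  · rw [dslB_nonpos hr]
    rw [dslA_step, if_neg (by omega : ¬ total_frames > 0)]
    simp only [if_neg (by omega : ¬ total_frames > 0)]
  · rcases hpre with h | ⟨hne, hpos⟩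
    · omega
    · have := key_sim (pre0 := lengths) lengths [] total_frames (total_frames.toNat + 1)
        (by simpa using hpos) rfl hne (by simp) (by omega)
      simpa using this
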